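-- pv_equiv track=rewrite | github.com/ErikUmble/EECS | LinearBlockCodes.py | rect_parity_encode
-- ===== SOURCE A (Python) =====
-- def rect_parity_encode(data, num_rows, num_cols):
--     """:return a list of size len(data) + num_rows + num_cols in the form [data, row_parity_bits, col_parity_bits]
--         input data should be a list of 1s and 0s, of length num_rows * num_cols
--     """
--     assert len(data) == num_rows * num_cols
--     codeword = data.copy()
--     for row in range(num_rows):
--         # appends the row parity bit (the mod 2 sum of the elements in the row)
--         # could alternatively use functools.reduce(lambda i, j: i ^ j, data[row * num_cols]) for xor of all the elements
--         # we assume rows are sequential elements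
--         codeword.append(sum(data[row * num_cols: (row + 1) * num_cols]) % 2)
--
--     for col in range(num_cols):
--         # similarly, appends the parity bit for the elements of the corresponding column
--         codeword.append(sum(data[col: num_cols * num_rows: num_cols]) % 2)
--
--     return codeword
-- ===== SOURCE B (Python) =====
-- def rect_parity_encode(data, num_rows, num_cols):
--     """:return a list of size len(data) + num_rows + num_cols in the form [data, row_parity_bits, col_parity_bits]
--         input data should be a list of 1s and 0s, of length num_rows * num_cols
--     """
--     assert len(data) == num_rows * num_cols
--     row_parity = [0] * num_rows
--     col_parity = [0] * num_cols
--     for i, bit in enumerate(data):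
--         row_parity[i // num_cols] += bit
--         col_parity[i % num_cols] += bit
--     return data + [p % 2 for p in row_parity] + [p % 2 for p in col_parity]
-- ===== Notes on version B (the rewrite author's own statement) =====
-- stated objective: alternative
-- what changed: Replaces A's num_rows+num_cols slice/stride passes over data (each building a sublist and summing it) with a single enumerate pass that accumulates all row and column parities in two accumulator arrays, then appends their mod-2 values.
-- outside the precondition, e.g. on rect_parity_encode([1, 1], -1, -2): A returns [1, 1], B raises IndexError
import Mathlib
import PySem

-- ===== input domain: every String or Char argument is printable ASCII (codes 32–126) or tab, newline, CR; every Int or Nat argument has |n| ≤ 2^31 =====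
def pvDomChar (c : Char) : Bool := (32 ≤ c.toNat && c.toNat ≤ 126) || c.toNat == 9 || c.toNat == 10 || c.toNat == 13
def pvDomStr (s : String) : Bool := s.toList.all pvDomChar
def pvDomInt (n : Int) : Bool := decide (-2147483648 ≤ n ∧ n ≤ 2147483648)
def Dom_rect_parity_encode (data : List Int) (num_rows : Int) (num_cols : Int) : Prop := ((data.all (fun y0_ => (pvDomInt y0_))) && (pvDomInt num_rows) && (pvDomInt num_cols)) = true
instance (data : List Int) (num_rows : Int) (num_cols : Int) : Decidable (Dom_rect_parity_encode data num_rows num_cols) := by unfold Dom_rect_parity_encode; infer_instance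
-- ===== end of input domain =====

-- B replaces the per-row/per-column slice-and-sum passes by one accumulating pass over enumerate(data) maintaining two parity arrays.


-- ===== PORT A =====
def rect_parity_encode (data : List Int) (num_rows : Int) (num_cols : Int) : List Int :=
  -- assert len(data) == num_rows * num_cols  → Pre_rect_parity_encode
  let codeword := data
  let codeword := (PySem.List.pyRange 0 num_rows 1).foldl
    (fun cw row => cw ++ [PySem.Int.mod (PySem.List.slice data (some (row * num_cols)) (some ((row + 1) * num_cols))).sum 2]) codeword
  let codeword := (PySem.List.pyRange 0 num_cols 1).foldl
    (fun cw col => cw ++ [PySem.Int.mod ((PySem.List.slice? data (some col) (some (num_cols * num_rows)) num_cols).getD []).sum 2]) codeword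
  -- .getD [] is unreachable: step num_cols = 0 would make the surrounding loop empty
  codeword

-- ===== PORT B =====
def rect_parity_encode_alt (data : List Int) (num_rows : Int) (num_cols : Int) : List Int :=
  -- [0] * n = List.replicate n.toNat 0 (empty for negative n, as in Python)
  let row_parity : List Int := List.replicate num_rows.toNat 0
  let col_parity : List Int := List.replicate num_cols.toNat 0
  -- list[i] += b with i nonnegative and in range (guaranteed by Pre_) is List.modify; Python would raise otherwise
  let rc := (PySem.List.enumerate data 0).foldl
    (fun (rc : List Int × List Int) p =>
      (rc.1.modify ((PySem.Int.floordiv p.1 num_cols).toNat) (· + p.2),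
       rc.2.modify ((PySem.Int.mod p.1 num_cols).toNat) (· + p.2)))
    (row_parity, col_parity)
  data ++ rc.1.map (fun p => PySem.Int.mod p 2) ++ rc.2.map (fun p => PySem.Int.mod p 2)

-- ===== PRECONDITION & SPEC =====
-- Pre_ excludes inputs failing A's assert (A raises AssertionError there) and the degenerate corner
-- where both dimensions are negative with nonempty data of matching (positive) product length, on which
-- A's empty loops accidentally return data unchanged while B raises IndexError sizing its accumulators.
def Pre_rect_parity_encode (data : List Int) (num_rows : Int) (num_cols : Int) : Prop :=
  (data.length : Int) = num_rows * num_cols ∧ (0 ≤ num_rows ∧ 0 ≤ num_cols ∨ data = [])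
instance (data : List Int) (num_rows : Int) (num_cols : Int) : Decidable (Pre_rect_parity_encode data num_rows num_cols) := by unfold Pre_rect_parity_encode; infer_instance
def pvWitness_rect_parity_encode : List Int × Int × Int := ([1, 0, 1, 1], 2, 2)
def Spec_rect_parity_encode (data : List Int) (num_rows : Int) (num_cols : Int) (out : List Int) : Prop := out = rect_parity_encode_alt data num_rows num_cols
instance (data : List Int) (num_rows : Int) (num_cols : Int) (out : List Int) : Decidable (Spec_rect_parity_encode data num_rows num_cols out) := by unfold Spec_rect_parity_encode; infer_instance

-- ===== CLAIM (what is proved, stated in full; the proofs are below) =====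
def Claim_equal_rect_parity_encode : Prop := ∀ (data : List Int) (num_rows : Int) (num_cols : Int), Dom_rect_parity_encode data num_rows num_cols → Pre_rect_parity_encode data num_rows num_cols → Spec_rect_parity_encode data num_rows num_cols (rect_parity_encode data num_rows num_cols)

-- ===== LEMMAS AND PROOFS =====

-- pair fold splits
lemma pv_foldl_prod {α β γ : Type} (f : β → α → β) (g : γ → α → γ) (l : List α) (b : β) (c : γ) :
    l.foldl (fun p x => (f p.1 x, g p.2 x)) (b, c) = (l.foldl f b, l.foldl g c) := by
  induction l generalizing b c with
  | nil => rfl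
  | cons x t ih => simp [List.foldl_cons, ih]

-- entries of a modify fold
lemma pv_getElem?_foldl_modify {α : Type} (h : α → Nat) (g : α → Int) (l : List α) (acc : List Int) (r : Nat) :
    (l.foldl (fun a p => a.modify (h p) (· + g p)) acc)[r]? =
      acc[r]?.map (· + ((l.filter (fun p => h p = r)).map g).sum) := by
  induction l generalizing acc with
  | nil => simp
  | cons x t ih =>
    rw [List.foldl_cons, ih, List.getElem?_modify]
    by_cases hc : h x = r
    · simp [hc, Option.map_map]
    · simp [hc]

-- strictly sorted lists with equal membership are equal
lemma pv_pairwise_ext (l₁ l₂ : List Int) (h₁ : l₁.Pairwise (· < ·)) (h₂ : l₂.Pairwise (· < ·))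
    (hm : ∀ x, x ∈ l₁ ↔ x ∈ l₂) : l₁ = l₂ := by
  refine List.eq_of_perm_of_sorted (fun a b _ _ hab hba => by omega) h₁ h₂ ?_
  exact (List.perm_ext_iff_of_nodup (h₁.imp ne_of_lt) (h₂.imp ne_of_lt)).mpr hm

lemma pv_helper_filterMap {α β : Type} (l : List α) (p : α → Option β) (f : α → β)
    (h : ∀ a ∈ l, p a = some (f a)) : l.filterMap p = l.map f := by
  induction l with
  | nil => rfl
  | cons x t ih => simp [h x (by simp), ih (fun a ha => h a (by simp [ha]))]


lemma pv_row_mem (C r : Nat) (x : Int) (hC : 0 < C) (h0 : 0 ≤ x) :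
    ((PySem.Int.floordiv x ↑C).toNat = r) ↔ ((↑(r*C) : Int) ≤ x ∧ x < ↑(r*C) + ↑C) := by
  have hCp : (0 : Int) < ↑C := by exact_mod_cast hC
  have hb := (PySem.Int.floordiv_eq_iff_of_pos (a := x) (b := ↑C) (q := PySem.Int.floordiv x ↑C) hCp).mp rfl
  set q := PySem.Int.floordiv x ↑C with hq
  have hq0 : 0 ≤ q := by
    by_contra hneg
    have : (q + 1) * ↑C ≤ 0 := mul_nonpos_of_nonpos_of_nonneg (by omega) (le_of_lt hCp)
    omega
  constructor
  · intro h
    have : q = (r : Int) := by omega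
    rw [this] at hb
    push_cast
    constructor
    · have := hb.1; push_cast at this ⊢; linarith
    · have := hb.2; push_cast at this ⊢; linarith
  · rintro ⟨h1, h2⟩
    have : q = (r : Int) := by
      have hrb : ((r:Int)) * ↑C ≤ x ∧ x < ((r:Int) + 1) * ↑C := by
        push_cast at h1 h2; constructor <;> nlinarith
      have hlt1 : q * ↑C < ((r:Int) + 1) * ↑C := lt_of_le_of_lt hb.1 hrb.2
      have hlt2 : (r:Int) * ↑C < (q + 1) * ↑C := lt_of_le_of_lt hrb.1 hb.2
      have := lt_of_mul_lt_mul_right hlt1 (le_of_lt hCp)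
      have := lt_of_mul_lt_mul_right hlt2 (le_of_lt hCp)
      omega
    omega

lemma pv_col_mem (C c : Nat) (x : Int) (hC : 0 < C) (hcC : c < C) (h0 : 0 ≤ x) :
    ((PySem.Int.mod x ↑C).toNat = c) ↔ ((↑c : Int) ≤ x ∧ (↑C : Int) ∣ x - ↑c) := by
  have hCp : (0 : Int) < ↑C := by exact_mod_cast hC
  rw [PySem.Int.mod_eq_emod_of_pos hCp]
  have hdm := Int.ediv_add_emod x ↑C
  have hnn : 0 ≤ x % ↑C := Int.emod_nonneg x (by omega)
  have hlt : x % ↑C < ↑C := Int.emod_lt_of_pos x hCp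
  have hqnn : 0 ≤ x / ↑C := Int.ediv_nonneg h0 (le_of_lt hCp)
  constructor
  · intro h
    have hxc : x % ↑C = ↑c := by omega
    constructor
    · nlinarith
    · exact ⟨x / ↑C, by linarith⟩
  · rintro ⟨h1, k, hk⟩
    have : x % ↑C = ↑c := by
      have : x = ↑c + ↑C * k := by linarith
      rw [this, Int.add_mul_emod_self_left]
      exact Int.emod_eq_of_lt (by exact_mod_cast Nat.zero_le c) (by exact_mod_cast hcC)
    omega

lemma pv_pairwise_pyRange_pos (a b s : Int) (hs : 0 < s) :
    (PySem.List.pyRange a b s).Pairwise (· < ·) := by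
  rw [PySem.List.pyRange_of_pos a b hs]
  refine List.pairwise_map.mpr ?_
  exact (List.pairwise_lt_range).imp (fun {i j} h => by nlinarith)

lemma pv_filter_row (R C r : Nat) (hC : 0 < C) (hr : r < R) :
    (PySem.List.pyRange 0 (↑(R*C)) 1).filter (fun j => (PySem.Int.floordiv j ↑C).toNat = r)
      = PySem.List.pyRange (↑(r*C)) (↑(r*C) + ↑C) 1 := by
  apply pv_pairwise_ext
  · exact (PySem.List.pairwise_lt_pyRange_one 0 (↑(R*C))).sublist List.filter_sublist
  · exact PySem.List.pairwise_lt_pyRange_one _ _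
  · intro x
    simp only [List.mem_filter, PySem.List.mem_pyRange_one, decide_eq_true_eq]
    have hseg : r * C + C ≤ R * C := by
      rw [← Nat.succ_mul]; exact Nat.mul_le_mul_right C hr
    have hcast : ((↑(r*C) : Int)) + ↑C ≤ ↑(R*C) := by exact_mod_cast hseg
    constructor
    · rintro ⟨⟨h0, hlt⟩, hq⟩
      exact (pv_row_mem C r x hC h0).mp hq
    · rintro ⟨h1, h2⟩
      have h0 : 0 ≤ x := le_trans (by positivity) h1
      exact ⟨⟨h0, by omega⟩, (pv_row_mem C r x hC h0).mpr ⟨h1, h2⟩⟩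

lemma pv_filter_col (R C c : Nat) (hC : 0 < C) (hc : c < C) :
    (PySem.List.pyRange 0 (↑(R*C)) 1).filter (fun j => (PySem.Int.mod j ↑C).toNat = c)
      = PySem.List.pyRange ↑c (↑(R*C)) ↑C := by
  have hCp : (0 : Int) < ↑C := by exact_mod_cast hC
  apply pv_pairwise_ext
  · exact (PySem.List.pairwise_lt_pyRange_one 0 (↑(R*C))).sublist List.filter_sublist
  · exact pv_pairwise_pyRange_pos _ _ _ hCp
  · intro x
    simp only [List.mem_filter, PySem.List.mem_pyRange_one, decide_eq_true_eq,
      PySem.List.mem_pyRange_iff_of_pos hCp]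
    constructor
    · rintro ⟨⟨h0, hlt⟩, hq⟩
      have := (pv_col_mem C c x hC hc h0).mp hq
      exact ⟨this.1, hlt, this.2⟩
    · rintro ⟨h1, h2, h3⟩
      have h0 : 0 ≤ x := le_trans (by positivity) h1
      exact ⟨⟨h0, h2⟩, (pv_col_mem C c x hC hc h0).mpr ⟨h1, h3⟩⟩

lemma pv_map_pyGetD_seg (data : List Int) (a C : Nat) (h : a + C ≤ data.length) :
    (PySem.List.pyRange ↑a (↑a + ↑C) 1).map (fun j => PySem.List.pyGetD data j 0)
      = (data.drop a).take C := by
  rw [PySem.List.pyRange_one]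
  have hcnt : ((↑a + ↑C - ↑a : Int)).toNat = C := by omega
  rw [hcnt, List.map_map]
  apply List.ext_getElem
  · simp; omega
  · intro k h1 h2
    simp only [List.getElem_map, List.getElem_range, Function.comp_apply]
    have hk : k < C := by simpa using h1
    rw [PySem.List.pyGetD_eq_getElem data 0 (by positivity) (by push_cast; omega)]
    have ht : ((↑a + ↑k : Int)).toNat = a + k := by omega
    simp [List.getElem_take, List.getElem_drop, ht]

lemma pv_count (R C c : Nat) (hC : 0 < C) (hc : c < C) :
    (if (↑c : Int) < ↑(R*C) then (((↑(R*C) : Int) - ↑c + ↑C - 1)/↑C).toNat else 0) = R := by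
  rcases Nat.eq_zero_or_pos R with hR | hR
  · subst hR; simp
  · have hcRC : (↑c : Int) < ↑(R*C) := by
      have : c < R * C := lt_of_lt_of_le hc (Nat.le_mul_of_pos_left C hR)
      exact_mod_cast this
    rw [if_pos hcRC]
    have hc1 : ((↑(C - 1 - c) : Int)) = ↑C - 1 - ↑c := by omega
    have hnum : ((↑(R*C) : Int) - ↑c + ↑C - 1) = (↑(C - 1 - c) : Int) + ↑R * ↑C := by rw [hc1]; push_cast; ring
    rw [hnum, Int.add_mul_ediv_right _ _ (by omega : (↑C:Int) ≠ 0)]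
    rw [Int.ediv_eq_zero_of_lt (by positivity) (by rw [hc1]; omega : (↑(C-1-c):Int) < ↑C)]
    omega

lemma pv_pyRange_step (R C c : Nat) (hC : 0 < C) (hc : c < C) :
    PySem.List.pyRange ↑c (↑(R*C)) ↑C = (List.range R).map (fun k => (↑c : Int) + ↑C * ↑k) := by
  rw [PySem.List.pyRange_of_pos _ _ (by exact_mod_cast hC)]
  rw [pv_count R C c hC hc]

lemma pv_foldl_app_singleton {α β : Type} (f : α → β) (l : List α) (acc : List β) :
    l.foldl (fun a x => a ++ [f x]) acc = acc ++ l.map f := by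
  induction l generalizing acc with
  | nil => simp
  | cons x t ih => simp [List.foldl_cons, ih]

lemma pv_Arow (data : List Int) (C r : Nat) :
    PySem.List.slice data (some ((↑r : Int) * ↑C)) (some (((↑r : Int) + 1) * ↑C))
      = (data.drop (r*C)).take C := by
  have e1 : ((↑r : Int) * ↑C) = ((↑(r*C) : Int)) := by push_cast; ring
  have e2 : (((↑r : Int) + 1) * ↑C) = ((↑(r*C) : Int)) + ↑C := by push_cast; ring
  rw [e1, e2, PySem.List.slice_natCast_add]

lemma pv_Brow_sum (data : List Int) (R C r : Nat) (hlen : data.length = R*C) (hr : r < R) :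
    (((PySem.List.pyRange 0 (↑(R*C)) 1).filter (fun j => (PySem.Int.floordiv j ↑C).toNat = r)).map
      (fun j => PySem.List.pyGetD data j 0)).sum = ((data.drop (r*C)).take C).sum := by
  rcases Nat.eq_zero_or_pos C with hC | hC
  · subst hC
    have : data = [] := List.eq_nil_of_length_eq_zero (by omega)
    subst this
    simp
  · rw [pv_filter_row R C r hC hr, pv_map_pyGetD_seg data (r*C) C (by rw [hlen, ← Nat.succ_mul] at *; exact Nat.mul_le_mul_right C hr)]

lemma pv_Bcol_sum (data : List Int) (R C c : Nat) (hC : 0 < C) (hc : c < C) :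
    (((PySem.List.pyRange 0 (↑(R*C)) 1).filter (fun j => (PySem.Int.mod j ↑C).toNat = c)).map
      (fun j => PySem.List.pyGetD data j 0)).sum
      = ((List.range R).map (fun k => PySem.List.pyGetD data ((↑c : Int) + ↑C * ↑k) 0)).sum := by
  rw [pv_filter_col R C c hC hc, pv_pyRange_step R C c hC hc, List.map_map]
  rfl

lemma pv_idx_lt (R C c k : Nat) (hc : c < C) (hk : k < R) : c + C * k < R * C := by
  calc c + C * k < C + C * k := by omega
    _ = C * (k + 1) := by ring
    _ ≤ C * R := Nat.mul_le_mul_left C hk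
    _ = R * C := Nat.mul_comm C R

lemma pv_Acol (data : List Int) (R C c : Nat) (hlen : data.length = R*C) (hC : 0 < C) (hc : c < C) :
    (PySem.List.slice? data (some ↑c) (some ((↑C : Int) * ↑R)) ↑C).getD []
      = (List.range R).map (fun k => PySem.List.pyGetD data ((↑c : Int) + ↑C * ↑k) 0) := by
  have hCne : ¬((↑C : Int) = 0) := by omega
  have hCpos : (0:Int) < ↑C := by exact_mod_cast hC
  rcases Nat.eq_zero_or_pos R with hR | hR
  · subst hR
    have hd : data = [] := List.eq_nil_of_length_eq_zero (by simpa using hlen)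
    subst hd
    simp [PySem.List.slice?, PySem.List.sliceIndices, not_lt_of_ge (le_of_lt hCpos),
      show ¬((↑c:Int) < 0) by omega, show C ≠ 0 by omega]
  · rw [PySem.List.slice?, PySem.List.sliceIndices]
    simp only [hCne, if_false, hlen]
    have hnotneg : ¬((↑C:Int) < 0) := by omega
    have hcnn : ¬((↑c:Int) < 0) := by omega
    have hCRnn : ¬((↑C:Int) * ↑R < 0) := not_lt.mpr (by positivity)
    simp only [hnotneg, if_false, hcnn, hCRnn]
    have hmin1 : min (↑c:Int) ↑(R*C) = ↑c := by
      apply min_eq_left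
      have : c < R*C := lt_of_lt_of_le hc (Nat.le_mul_of_pos_left C hR)
      omega
    have hmin2 : min ((↑C:Int) * ↑R) ↑(R*C) = ↑(R*C) := by
      apply min_eq_right; push_cast; rw [mul_comm]
    rw [hmin1, hmin2]
    rw [if_pos hCpos, pv_count R C c hC hc, Option.getD_some]
    apply pv_helper_filterMap
    intro k hk
    have hkR : k < R := List.mem_range.mp hk
    have hidx : c + C * k < R * C := pv_idx_lt R C c k hc hkR
    have hcast : ((↑c : Int) + ↑C * ↑k) = ((↑(c + C * k) : Int)) := by push_cast; ring
    rw [hcast, Int.toNat_natCast, PySem.List.pyGetD_natCast]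
    rw [List.getElem?_eq_getElem (by omega : c + C*k < data.length)]
    rw [List.getD_eq_getElem data 0 (by omega)]

theorem pv_core (data : List Int) (R C : Nat) (hlen : data.length = R * C) :
    rect_parity_encode data ↑R ↑C = rect_parity_encode_alt data ↑R ↑C := by
  unfold rect_parity_encode rect_parity_encode_alt
  dsimp only
  rw [PySem.List.enumerate_eq_map_pyRange data 0]
  rw [PySem.List.len_eq, hlen]
  rw [List.foldl_map]
  rw [pv_foldl_prod (fun (b : List Int) (j : Int) => b.modify ((PySem.Int.floordiv j ↑C).toNat) (· + PySem.List.pyGetD data j 0))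
      (fun (b : List Int) (j : Int) => b.modify ((PySem.Int.mod j ↑C).toNat) (· + PySem.List.pyGetD data j 0))]
  rw [PySem.List.pyRange_zero_natCast R, PySem.List.pyRange_zero_natCast C]
  rw [List.foldl_map, List.foldl_map, pv_foldl_app_singleton, pv_foldl_app_singleton]
  rw [Int.toNat_natCast, Int.toNat_natCast, List.append_assoc, List.append_assoc]
  congr 1
  congr 1
  · -- rows
    apply List.ext_getElem?
    intro i
    rw [List.getElem?_map, List.getElem?_map, pv_getElem?_foldl_modify, List.getElem?_replicate]
    by_cases hi : i < R
    · rw [List.getElem?_range hi, if_pos hi]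
      simp only [Option.map_some]
      congr 1
      rw [pv_Arow data C i, zero_add, pv_Brow_sum data R C i hlen hi]
    · rw [List.getElem?_eq_none_iff.mpr (by simpa using hi), if_neg hi]; rfl
  · -- cols
    apply List.ext_getElem?
    intro i
    rw [List.getElem?_map, List.getElem?_map, pv_getElem?_foldl_modify, List.getElem?_replicate]
    by_cases hi : i < C
    · rw [List.getElem?_range hi, if_pos hi]
      simp only [Option.map_some]
      congr 1
      rw [pv_Acol data R C i hlen (by omega) hi, zero_add, pv_Bcol_sum data R C i (by omega) hi]
    · rw [List.getElem?_eq_none_iff.mpr (by simpa using hi), if_neg hi]; rfl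

-- ===== VERDICT (by name: the statement is the Claim_ definition above) =====
lemma pv_slice?_nil (a b : Option Int) (st : Int) :
    (PySem.List.slice? ([] : List Int) a b st).getD [] = [] := by
  by_cases hst : st = 0 <;> simp [PySem.List.slice?, hst]

lemma pv_nil (R C : Int) : rect_parity_encode [] R C = rect_parity_encode_alt [] R C := by
  unfold rect_parity_encode rect_parity_encode_alt
  dsimp only
  rw [pv_foldl_app_singleton, pv_foldl_app_singleton]
  simp [pv_slice?_nil, PySem.List.slice, List.map_const', PySem.List.length_pyRange_one,
    show PySem.Int.mod 0 2 = 0 from rfl]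

theorem rect_parity_encode_spec : Claim_equal_rect_parity_encode := by
  intro data num_rows num_cols _hdom hpre
  obtain ⟨hlen, hrest⟩ := hpre
  unfold Spec_rect_parity_encode
  rcases hrest with ⟨hR, hC⟩ | hnil
  · obtain ⟨R, rfl⟩ := Int.eq_ofNat_of_zero_le hR
    obtain ⟨C, rfl⟩ := Int.eq_ofNat_of_zero_le hC
    exact pv_core data R C (by exact_mod_cast hlen)
  · subst hnil
    exact pv_nil num_rows num_cols
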